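-- pv_equiv track=rewrite | github.com/nitin001singh/Data-Structure---Algorithm | OA/Program14.py | answer
-- ===== SOURCE A (Python) =====
-- def answer(nums):
--     n = len(nums)
--     pref = [0] * n
--     suff = [0] * n
--
--     # Build prefix counts
--     for j in range(n):
--         count = 0
--         for i in range(j):
--             if nums[i] > nums[j]:
--                 count += 1
--         pref[j] = count
--
--     # Build suffix counts
--     for k in range(n):
--         count = 0
--         for l in range(k + 1, n):
--             if nums[k] > nums[l]:
--                 count += 1
--         suff[k] = count
--
--     # Calculate total valid quadruplets
--     total = 0
--     for j in range(n):
--         for k in range(j + 1, n):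
--             if nums[j] < nums[k]:
--                 total += pref[j] * suff[k]
--
--     return pref, suff, total
-- ===== SOURCE B (Python) =====
-- def _split(a, x, strict):
--     # binary search on ascending a: first index i with NOT (a[i] < x) if strict,
--     # else first index i with NOT (a[i] <= x)
--     lo, hi = 0, len(a)
--     while lo < hi:
--         mid = (lo + hi) // 2
--         if (a[mid] < x) if strict else (a[mid] <= x):
--             lo = mid + 1
--         else:
--             hi = mid
--     return lo
--
--
-- def answer(nums):
--     n = len(nums)
--
--     # suffix counts: right-to-left sweep over a sorted list of the values seen so far
--     suff = [0] * n
--     seen = []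
--     for k in range(n - 1, -1, -1):
--         x = nums[k]
--         suff[k] = _split(seen, x, True)            # elements < x among later values
--         seen.insert(_split(seen, x, False), x)     # keep `seen` sorted
--
--     # forward sweep: prefix counts and the weighted total in one pass
--     pref = [0] * n
--     vals = []   # sorted values seen so far
--     ws = []     # pref-weights aligned with vals
--     total = 0
--     for k in range(n):
--         x = nums[k]
--         lt = _split(vals, x, True)
--         le = _split(vals, x, False)
--         pref[k] = len(vals) - le
--         total += suff[k] * sum(ws[:lt])
--         vals.insert(le, x)
--         ws.insert(le, pref[k])
--     return pref, suff, total
-- ===== Notes on version B (the rewrite author's own statement) =====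
-- stated objective: faster
-- what changed: A's three O(n^2) nested index scans are replaced by two sweeps that maintain the already-seen values in a sorted list with a hand-written binary search: suffix counts come from a right-to-left sweep, and prefix counts plus the weighted total are read off the sorted structure in one forward sweep, so all inner comparison scans disappear.
import Mathlib
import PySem

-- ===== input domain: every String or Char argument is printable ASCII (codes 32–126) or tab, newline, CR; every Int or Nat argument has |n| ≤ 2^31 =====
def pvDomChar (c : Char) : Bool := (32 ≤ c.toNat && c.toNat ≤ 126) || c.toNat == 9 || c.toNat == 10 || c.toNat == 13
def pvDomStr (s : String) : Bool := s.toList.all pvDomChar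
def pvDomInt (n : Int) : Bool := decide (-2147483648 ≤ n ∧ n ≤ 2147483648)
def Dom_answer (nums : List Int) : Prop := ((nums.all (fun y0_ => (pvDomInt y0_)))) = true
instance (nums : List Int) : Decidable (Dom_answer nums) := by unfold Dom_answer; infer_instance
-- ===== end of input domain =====

-- B replaces A's three quadratic index scans by two sweeps that keep the already-seen
-- values in a sorted list (hand-written binary search + insertion), reading each
-- prefix/suffix count off the sorted list and accumulating the weighted total in the
-- same forward sweep; measurably faster, same exact outputs.

-- ===== PORT A =====
def answer (nums : List Int) : List Int × List Int × Int :=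
  let n : Int := (nums.length : Int)
  let pref0 : List Int := List.replicate nums.length 0
  let suff0 : List Int := List.replicate nums.length 0
  let pref := (PySem.List.pyRange 0 n).foldl (fun pref j =>
      let count := (PySem.List.pyRange 0 j).foldl
        (fun c i => if PySem.List.pyGetD nums i 0 > PySem.List.pyGetD nums j 0 then c + 1 else c)
        (0 : Int)
      PySem.List.pySetD pref j count) pref0
  let suff := (PySem.List.pyRange 0 n).foldl (fun suff k =>
      let count := (PySem.List.pyRange (k + 1) n).foldl
        (fun c l => if PySem.List.pyGetD nums k 0 > PySem.List.pyGetD nums l 0 then c + 1 else c)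
        (0 : Int)
      PySem.List.pySetD suff k count) suff0
  let total := (PySem.List.pyRange 0 n).foldl (fun t j =>
      (PySem.List.pyRange (j + 1) n).foldl
        (fun t k => if PySem.List.pyGetD nums j 0 < PySem.List.pyGetD nums k 0
                    then t + PySem.List.pyGetD pref j 0 * PySem.List.pyGetD suff k 0
                    else t) t) (0 : Int)
  (pref, suff, total)

-- ===== PORT B =====
-- Source B's _split: hand-written binary search; the fuel argument (bounded by the list
-- length, which the interval size never exceeds) only makes the recursion structural.
def splitGo (a : List Int) (x : Int) (strict : Bool) (lo hi : Int) : Nat → Int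
  | 0 => lo
  | fuel + 1 =>
    if lo < hi then
      let mid := PySem.Int.floordiv (lo + hi) 2
      if (if strict then PySem.List.pyGetD a mid 0 < x else PySem.List.pyGetD a mid 0 ≤ x)
      then splitGo a x strict (mid + 1) hi fuel
      else splitGo a x strict lo mid fuel
    else lo

def split (a : List Int) (x : Int) (strict : Bool) : Int :=
  splitGo a x strict 0 (a.length : Int) (a.length + 1)

def answer_alt (nums : List Int) : List Int × List Int × Int :=
  let n : Int := (nums.length : Int)
  -- right-to-left sweep: suffix counts off a sorted list of the later values
  let sp := (PySem.List.pyRange (n - 1) (-1) (-1)).foldl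
      (fun (st : List Int × List Int) k =>
        let x := PySem.List.pyGetD nums k 0
        let suff := PySem.List.pySetD st.1 k (split st.2 x true)
        let seen := PySem.List.insert st.2 (split st.2 x false) x
        (suff, seen))
      (List.replicate nums.length 0, [])
  let suff := sp.1
  -- forward sweep: prefix counts and the weighted total in one pass
  let fp := (PySem.List.pyRange 0 n).foldl
      (fun (st : List Int × List Int × List Int × Int) k =>
        let x := PySem.List.pyGetD nums k 0
        let lt := split st.2.1 x true
        let le := split st.2.1 x false
        let p := (st.2.1.length : Int) - le
        let pref := PySem.List.pySetD st.1 k p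
        let total := st.2.2.2 + PySem.List.pyGetD suff k 0 * (PySem.List.slice st.2.2.1 none (some lt)).sum
        let vals := PySem.List.insert st.2.1 le x
        let ws := PySem.List.insert st.2.2.1 le p
        (pref, vals, ws, total))
      (List.replicate nums.length 0, [], [], 0)
  (fp.1, suff, fp.2.2.2)

-- ===== PRECONDITION & SPEC =====
def Spec_answer (nums : List Int) (out : List Int × List Int × Int) : Prop := out = answer_alt nums
instance (nums : List Int) (out : List Int × List Int × Int) : Decidable (Spec_answer nums out) := by unfold Spec_answer; infer_instance

-- ===== CLAIM (what is proved, stated in full; the proofs are below) =====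
def Claim_equal_answer : Prop := ∀ (nums : List Int), Dom_answer nums → Spec_answer nums (answer nums)

-- ===== LEMMAS AND PROOFS =====

-- Bool predicates used by the common specification layer
def ltb (x : Int) : Int → Bool := fun v => decide (v < x)
def leb (x : Int) : Int → Bool := fun v => decide (v ≤ x)
def gtb (x : Int) : Int → Bool := fun v => decide (x < v)
def pb (x : Int) (strict : Bool) : Int → Bool := if strict then ltb x else leb x

-- the common specification of both programs' three outputs
def pS (nums : List Int) (j : Nat) : Int := ((nums.take j).countP (gtb (nums.getD j 0)) : Int)
def sS (nums : List Int) (k : Nat) : Int := ((nums.drop (k + 1)).countP (ltb (nums.getD k 0)) : Int)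
def Wsum (nums : List Int) (m : Nat) (x : Int) : Int :=
  ((List.range m).map (fun j => if nums.getD j 0 < x then pS nums j else 0)).sum
def tS (nums : List Int) : Int :=
  ((List.range nums.length).map (fun k => sS nums k * Wsum nums k (nums.getD k 0))).sum

lemma pb_mono (x : Int) (strict : Bool) (u v : Int) (huv : u ≤ v)
    (hv : pb x strict v = true) : pb x strict u = true := by
  cases strict <;> simp [pb, ltb, leb] at * <;> omega

-- on a sorted list, a downward-closed predicate holds exactly on the first countP entries
lemma countP_sorted_iff (a : List Int) (p : Int → Bool)
    (hs : List.Pairwise (· ≤ ·) a)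
    (hmono : ∀ u v : Int, u ≤ v → p v = true → p u = true)
    (i : Nat) (hi : i < a.length) : (p a[i] = true ↔ i < a.countP p) := by
  have hget := List.pairwise_iff_getElem.mp hs
  constructor
  · intro hp
    have htake : (a.take (i+1)).countP p = (a.take (i+1)).length := by
      rw [List.countP_eq_length]
      intro b hb
      obtain ⟨j, hj, rfl⟩ := List.mem_iff_getElem.mp hb
      have hj' : j < a.length := lt_of_lt_of_le hj (by simp [List.length_take])
      rw [List.getElem_take]
      have hle : a[j] ≤ a[i] := by
        rcases Nat.lt_or_ge j i with h | h
        · exact hget j i hj' hi h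
        · have : j = i := by simp [List.length_take] at hj; omega
          subst this; rfl
      exact hmono _ _ hle hp
    have hlen : (a.take (i+1)).length = i + 1 := by simp [List.length_take]; omega
    have := List.Sublist.countP_le (p := p) (List.take_sublist (i+1) a)
    omega
  · intro hc
    by_contra hp
    have hdrop : (a.drop i).countP p = 0 := by
      rw [List.countP_eq_zero]
      intro b hb
      obtain ⟨j, hj, rfl⟩ := List.mem_iff_getElem.mp hb
      rw [List.getElem_drop]
      intro hpb
      have hj' : i + j < a.length := by simp [List.length_drop] at hj; omega
      have hle : a[i] ≤ a[i+j] := by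
        rcases Nat.eq_zero_or_pos j with h | h
        · subst h; rfl
        · exact hget i (i+j) hi hj' (by omega)
      exact hp (hmono _ _ hle hpb)
    have hsplit : a.countP p = (a.take i).countP p + (a.drop i).countP p := by
      rw [← List.countP_append, List.take_append_drop]
    have := List.countP_le_length (p := p) (l := a.take i)
    simp [List.length_take] at this
    omega

lemma mem_take_countP (a : List Int) (p : Int → Bool)
    (hs : List.Pairwise (· ≤ ·) a)
    (hmono : ∀ u v : Int, u ≤ v → p v = true → p u = true) :
    ∀ b ∈ a.take (a.countP p), p b = true := by
  intro b hb
  obtain ⟨j, hj, rfl⟩ := List.mem_iff_getElem.mp hb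
  have hj' : j < a.length := lt_of_lt_of_le hj (by simp [List.length_take])
  rw [List.getElem_take]
  exact (countP_sorted_iff a p hs hmono j hj').mpr
    (by simp [List.length_take] at hj; omega)

lemma mem_drop_countP (a : List Int) (p : Int → Bool)
    (hs : List.Pairwise (· ≤ ·) a)
    (hmono : ∀ u v : Int, u ≤ v → p v = true → p u = true) :
    ∀ b ∈ a.drop (a.countP p), p b = false := by
  intro b hb
  obtain ⟨j, hj, rfl⟩ := List.mem_iff_getElem.mp hb
  rw [List.getElem_drop]
  simp only [List.length_drop] at hj
  have hj' : a.countP p + j < a.length := by omega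
  have hiff := (countP_sorted_iff a p hs hmono (a.countP p + j) hj')
  rw [← Bool.not_eq_true]
  intro hpb
  have := hiff.mp hpb
  omega

-- the hand-written binary search returns countP of the matching predicate on a sorted list
lemma splitGo_eq (a : List Int) (x : Int) (strict : Bool)
    (hs : List.Pairwise (· ≤ ·) a) :
    ∀ (fuel : Nat) (lo hi : Int), 0 ≤ lo → hi ≤ (a.length : Int) →
      lo ≤ (a.countP (pb x strict) : Int) → (a.countP (pb x strict) : Int) ≤ hi →
      (hi - lo).toNat < fuel →
      splitGo a x strict lo hi fuel = (a.countP (pb x strict) : Int) := by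
  intro fuel
  induction fuel with
  | zero => intro lo hi _ _ _ _ h; omega
  | succ fuel ih =>
    intro lo hi h0 h1 hlc hch hf
    rw [splitGo]
    by_cases hlh : lo < hi
    · simp only [if_pos hlh]
      have hmb := PySem.Int.floordiv_two_mid_bounds (le_of_lt hlh)
      have hmhi : PySem.Int.floordiv (lo + hi) 2 < hi :=
        (PySem.Int.floordiv_lt_iff_lt_mul (by norm_num)).mpr (by omega)
      set mid := PySem.Int.floordiv (lo + hi) 2 with hmid
      have hmnn : 0 ≤ mid := le_trans h0 hmb.1
      have hmlt : mid < (a.length : Int) := lt_of_lt_of_le hmhi h1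
      have hget : PySem.List.pyGetD a mid 0 = a[mid.toNat] :=
        PySem.List.pyGetD_eq_getElem a 0 hmnn hmlt
      have hmltn : mid.toNat < a.length := by omega
      have hiff := countP_sorted_iff a (pb x strict) hs (pb_mono x strict) mid.toNat hmltn
      have hcond : (if strict then PySem.List.pyGetD a mid 0 < x else PySem.List.pyGetD a mid 0 ≤ x)
          ↔ pb x strict a[mid.toNat] = true := by
        cases strict <;> simp [pb, ltb, leb, hget]
      by_cases hc : (if strict then PySem.List.pyGetD a mid 0 < x else PySem.List.pyGetD a mid 0 ≤ x)
      · simp only [if_pos hc]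
        have : mid.toNat < a.countP (pb x strict) := hiff.mp (hcond.mp hc)
        exact ih (mid + 1) hi (by omega) h1 (by omega) hch (by omega)
      · simp only [if_neg hc]
        have : ¬ (mid.toNat < a.countP (pb x strict)) := fun h => hc (hcond.mpr (hiff.mpr h))
        exact ih lo mid h0 (le_of_lt hmlt) hlc (by omega) (by omega)
    · simp only [if_neg hlh]; omega

lemma split_eq (a : List Int) (x : Int) (strict : Bool)
    (hs : List.Pairwise (· ≤ ·) a) :
    split a x strict = (a.countP (pb x strict) : Int) := by
  have hc : a.countP (pb x strict) ≤ a.length := List.countP_le_length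
  exact splitGo_eq a x strict hs (a.length + 1) 0 a.length (le_refl _)
    (le_refl _) (by positivity) (by exact_mod_cast hc) (by omega)

-- inserting x at position countP (· ≤ x) keeps the list sorted
lemma sorted_insert_at_countP (a : List Int) (x : Int)
    (hs : List.Pairwise (· ≤ ·) a) :
    List.Pairwise (· ≤ ·) (a.take (a.countP (leb x)) ++ x :: a.drop (a.countP (leb x))) := by
  have hmono : ∀ u v : Int, u ≤ v → leb x v = true → leb x u = true := by
    intro u v h hv; simp [leb] at *; omega
  rw [List.pairwise_append]
  refine ⟨hs.sublist (List.take_sublist _ _), ?_, ?_⟩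
  · rw [List.pairwise_cons]
    refine ⟨?_, hs.sublist (List.drop_sublist _ _)⟩
    intro b hb
    have := mem_drop_countP a (leb x) hs hmono b hb
    simp [leb] at this; omega
  · intro b hb c hc
    have hbx : b ≤ x := by
      have := mem_take_countP a (leb x) hs hmono b hb
      simp [leb] at this; omega
    rcases List.mem_cons.mp hc with rfl | hc'
    · exact hbx
    · have hcx : x < c := by
        have := mem_drop_countP a (leb x) hs hmono c hc'
        simp [leb] at this; omega
      omega

-- counting a value predicate over a Python index range is countP over the slice
lemma countP_pyRange (nums : List Int) (p : Int → Bool) :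
    ∀ (d a b : Nat), b - a ≤ d → b ≤ nums.length →
      (PySem.List.pyRange (a : Int) (b : Int)).countP (fun i => p (PySem.List.pyGetD nums i 0))
        = ((nums.take b).drop a).countP p := by
  intro d
  induction d with
  | zero =>
    intro a b hd hb
    have hba : b ≤ a := by omega
    rw [PySem.List.pyRange_one_eq_nil (by exact_mod_cast hba)]
    have : (nums.take b).drop a = [] := by
      apply List.drop_eq_nil_of_le; simp [List.length_take]; omega
    simp [this]
  | succ d ih =>
    intro a b hd hb
    by_cases hab : a < b
    · rw [PySem.List.pyRange_one_cons (by exact_mod_cast hab)]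
      have hcast : ((a : Int) + 1) = ((a + 1 : Nat) : Int) := by push_cast; ring
      rw [List.countP_cons, hcast, ih (a+1) b (by omega) hb]
      have ha' : a < (nums.take b).length := by simp [List.length_take]; omega
      rw [List.drop_eq_getElem_cons ha', List.countP_cons]
      have : PySem.List.pyGetD nums (a : Int) 0 = (nums.take b)[a] := by
        rw [PySem.List.pyGetD_natCast, List.getElem_take (h := ha')]
        exact PySem.List.getD_eq_getElem_of_lt nums a 0 (by omega)
      rw [this]
    · rw [PySem.List.pyRange_one_eq_nil (by exact_mod_cast (by omega : b ≤ a))]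
      have : (nums.take b).drop a = [] := by
        apply List.drop_eq_nil_of_le; simp [List.length_take]; omega
      simp [this]

lemma set_append_length {α : Type} (l1 l2 : List α) (v : α) :
    (l1 ++ l2).set l1.length v = l1 ++ l2.set 0 v := by
  induction l1 with
  | nil => simp
  | cons h t ih => simp [List.set_cons_succ, ih]

-- building an array by successive in-order writes yields the map
lemma foldl_pySetD_map (len : Nat) (g : Int → Int) :
    ∀ m, m ≤ len →
      List.foldl (fun arr j => PySem.List.pySetD arr j (g j))
        (List.replicate len (0 : Int)) ((List.range m).map (fun k : Nat => (k : Int)))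
      = (List.range m).map (fun j : Nat => g (j : Int)) ++ List.replicate (len - m) 0 := by
  intro m
  induction m with
  | zero => simp
  | succ m ih =>
    intro hm
    rw [List.range_succ, List.map_append, List.foldl_append, ih (by omega)]
    simp only [List.map_cons, List.map_nil, List.foldl_cons, List.foldl_nil]
    rw [PySem.List.pySetD_natCast]
    have hlen : ((List.range m).map (fun j : Nat => g (j : Int))).length = m := by simp
    have hrep : List.replicate (len - m) (0 : Int) = 0 :: List.replicate (len - (m+1)) 0 := by
      have : len - m = (len - (m+1)) + 1 := by omega
      rw [this, List.replicate_succ]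
    have hset := set_append_length ((List.range m).map (fun j : Nat => g (j : Int)))
      (List.replicate (len - m) (0 : Int)) (g (m : Int))
    rw [hlen] at hset
    rw [hset, hrep, List.set_cons_zero]
    simp

lemma set_map_range (len : Nat) (f : Nat → Int) (k : Nat) (v : Int) (_hk : k < len) :
    ((List.range len).map f).set k v
      = (List.range len).map (fun i => if i = k then v else f i) := by
  apply List.ext_getElem
  · simp
  · intro i h1 h2
    simp only [List.getElem_set, List.getElem_map, List.getElem_range] at *
    split_ifs with h h' h'
    · rfl
    · omega
    · omega
    · rfl

-- sum of a function over a Python index range as a Finset sum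
lemma sum_map_pyRange (f : Int → Int) :
    ∀ (d a b : Nat), b - a ≤ d →
      ((PySem.List.pyRange (a : Int) (b : Int)).map f).sum = ∑ k ∈ Finset.Ico a b, f (k : Int) := by
  intro d
  induction d with
  | zero =>
    intro a b hd
    rw [PySem.List.pyRange_one_eq_nil (by exact_mod_cast (by omega : b ≤ a)),
      Finset.Ico_eq_empty (by omega)]
    simp
  | succ d ih =>
    intro a b hd
    by_cases hab : a < b
    · rw [PySem.List.pyRange_one_cons (by exact_mod_cast hab)]
      have hcast : ((a : Int) + 1) = ((a + 1 : Nat) : Int) := by push_cast; ring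
      rw [List.map_cons, List.sum_cons, hcast, ih (a+1) b (by omega),
        Finset.sum_eq_sum_Ico_succ_bot hab]
    · rw [PySem.List.pyRange_one_eq_nil (by exact_mod_cast (by omega : b ≤ a)),
        Finset.Ico_eq_empty (by omega)]
      simp

lemma sum_list_range (n : Nat) (f : Nat → Int) :
    ((List.range n).map f).sum = ∑ i ∈ Finset.range n, f i := by
  induction n with
  | zero => simp
  | succ n ih => rw [List.range_succ, List.map_append, Finset.sum_range_succ]; simp [ih]

-- the triangular double sum, both orders
lemma sum_triangle (n : Nat) (F : Nat → Nat → Int) :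
    (∑ j ∈ Finset.range n, ∑ k ∈ Finset.Ico (j + 1) n, F j k)
      = ∑ k ∈ Finset.range n, ∑ j ∈ Finset.range k, F j k := by
  have h1 : ∀ j, ∑ k ∈ Finset.Ico (j + 1) n, F j k
      = ∑ k ∈ Finset.range n, if k ∈ Finset.Ico (j + 1) n then F j k else 0 := by
    intro j
    rw [Finset.sum_ite_mem]
    congr 1
    rw [Finset.inter_eq_right.mpr]
    intro k hk
    simp [Finset.mem_Ico] at hk ⊢
    omega
  simp only [h1]
  rw [Finset.sum_comm]
  apply Finset.sum_congr rfl
  intro k hk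
  simp only [Finset.mem_range] at hk
  have h2 : ∀ j, (if k ∈ Finset.Ico (j + 1) n then F j k else 0)
      = if j ∈ Finset.range k then F j k else 0 := by
    intro j
    simp [Finset.mem_Ico, Finset.mem_range]
    split_ifs <;> first | rfl | omega
  simp only [h2]
  rw [Finset.sum_ite_mem, Finset.inter_eq_right.mpr]
  intro j hj
  simp [Finset.mem_range] at *
  omega

-- the weighted filtered sum over the zipped prefix equals Wsum
lemma zip_filter_sum (nums : List Int) (x : Int) :
    ∀ m, m ≤ nums.length →
      ((((nums.take m).zip ((List.range m).map (pS nums))).filter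
          (fun q => ltb x q.1)).map Prod.snd).sum = Wsum nums m x := by
  intro m
  induction m with
  | zero => simp [Wsum]
  | succ m ih =>
    intro hm
    have hm' : m < nums.length := by omega
    have htake : nums.take (m+1) = nums.take m ++ [nums[m]] := by
      rw [List.take_add_one]; simp [List.getElem?_eq_getElem hm']
    have hrange : (List.range (m+1)).map (pS nums) = (List.range m).map (pS nums) ++ [pS nums m] := by
      rw [List.range_succ, List.map_append]; rfl
    have hlen : (nums.take m).length = ((List.range m).map (pS nums)).length := by
      simp [List.length_take]; omega
    rw [htake, hrange, List.zip_append hlen, List.filter_append, List.map_append,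
      List.sum_append, ih (by omega)]
    have hgd : nums.getD m 0 = nums[m] := PySem.List.getD_eq_getElem_of_lt nums m 0 hm'
    unfold Wsum
    rw [List.range_succ, List.map_append, List.sum_append]
    simp only [List.zip_cons_cons, List.zip_nil_right, List.map_cons, List.map_nil,
      List.sum_cons, List.sum_nil, List.filter, hgd]
    by_cases hx : nums[m] < x
    · simp [ltb, hx]
    · simp [ltb, hx]

-- ===== characterization of port A =====
lemma prefA_eq (nums : List Int) :
    (PySem.List.pyRange 0 (nums.length : Int)).foldl (fun pref j =>
      PySem.List.pySetD pref j ((PySem.List.pyRange 0 j).foldl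
        (fun c i => if PySem.List.pyGetD nums i 0 > PySem.List.pyGetD nums j 0 then c + 1 else c) 0))
      (List.replicate nums.length 0)
    = (List.range nums.length).map (pS nums) := by
  rw [PySem.List.pyRange_zero_natCast,
    foldl_pySetD_map nums.length _ nums.length (le_refl _)]
  simp only [Nat.sub_self, List.replicate_zero, List.append_nil]
  apply List.map_congr_left
  intro j hj
  rw [List.mem_range] at hj
  rw [PySem.List.foldl_congr_mem _ _
    (fun c i => if decide (PySem.List.pyGetD nums (j : Int) 0 < PySem.List.pyGetD nums i 0) = true then c + 1 else c)
    _ (by intro acc x _; simp [gt_iff_lt])]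
  rw [PySem.List.foldl_count_if, zero_add]
  have hc := countP_pyRange nums (fun v => decide (PySem.List.pyGetD nums (j : Int) 0 < v))
    nums.length 0 j (by omega) (by omega)
  simp only [Nat.cast_zero] at hc
  rw [hc, List.drop_zero]
  unfold pS gtb
  rw [PySem.List.pyGetD_natCast]

lemma suffA_eq (nums : List Int) :
    (PySem.List.pyRange 0 (nums.length : Int)).foldl (fun suff k =>
      PySem.List.pySetD suff k ((PySem.List.pyRange (k + 1) (nums.length : Int)).foldl
        (fun c l => if PySem.List.pyGetD nums k 0 > PySem.List.pyGetD nums l 0 then c + 1 else c) 0))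
      (List.replicate nums.length 0)
    = (List.range nums.length).map (sS nums) := by
  rw [PySem.List.pyRange_zero_natCast,
    foldl_pySetD_map nums.length _ nums.length (le_refl _)]
  simp only [Nat.sub_self, List.replicate_zero, List.append_nil]
  apply List.map_congr_left
  intro k hk
  rw [List.mem_range] at hk
  rw [PySem.List.foldl_congr_mem _ _
    (fun c l => if decide (PySem.List.pyGetD nums l 0 < PySem.List.pyGetD nums (k : Int) 0) = true then c + 1 else c)
    _ (by intro acc x _; simp [gt_iff_lt])]
  rw [PySem.List.foldl_count_if, zero_add]
  have hc := countP_pyRange nums (fun v => decide (v < PySem.List.pyGetD nums (k : Int) 0))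
    nums.length (k + 1) nums.length (by omega) (by omega)
  simp only [Nat.cast_add, Nat.cast_one] at hc
  rw [hc, List.take_length]
  unfold sS ltb
  rw [PySem.List.pyGetD_natCast]

lemma totalA_eq (nums : List Int) :
    (PySem.List.pyRange 0 (nums.length : Int)).foldl (fun t j =>
      (PySem.List.pyRange (j + 1) (nums.length : Int)).foldl
        (fun t k => if PySem.List.pyGetD nums j 0 < PySem.List.pyGetD nums k 0
                    then t + PySem.List.pyGetD ((List.range nums.length).map (pS nums)) j 0
                           * PySem.List.pyGetD ((List.range nums.length).map (sS nums)) k 0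
                    else t) t) (0 : Int)
    = tS nums := by
  rw [PySem.List.pyRange_zero_natCast]
  rw [PySem.List.foldl_congr_mem _ _
    (fun t j => t + ((PySem.List.pyRange (j + 1) (nums.length : Int)).map
      (fun k => if PySem.List.pyGetD nums j 0 < PySem.List.pyGetD nums k 0
                then PySem.List.pyGetD ((List.range nums.length).map (pS nums)) j 0
                   * PySem.List.pyGetD ((List.range nums.length).map (sS nums)) k 0
                else 0)).sum)
    _ ?_]
  · rw [PySem.List.foldl_add, zero_add, List.map_map, sum_list_range]
    have hstep : ∀ j ∈ Finset.range nums.length,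
        ((PySem.List.pyRange ((j : Int) + 1) (nums.length : Int)).map
          (fun k => if PySem.List.pyGetD nums (j : Int) 0 < PySem.List.pyGetD nums k 0
                    then PySem.List.pyGetD ((List.range nums.length).map (pS nums)) (j : Int) 0
                       * PySem.List.pyGetD ((List.range nums.length).map (sS nums)) k 0
                    else 0)).sum
        = ∑ k ∈ Finset.Ico (j + 1) nums.length,
            (if nums.getD j 0 < nums.getD k 0 then pS nums j * sS nums k else 0) := by
      intro j hj
      rw [Finset.mem_range] at hj
      have hs := sum_map_pyRange
        (fun k => if PySem.List.pyGetD nums (j : Int) 0 < PySem.List.pyGetD nums k 0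
                  then PySem.List.pyGetD ((List.range nums.length).map (pS nums)) (j : Int) 0
                     * PySem.List.pyGetD ((List.range nums.length).map (sS nums)) k 0
                  else 0) nums.length (j + 1) nums.length (by omega)
      simp only [Nat.cast_add, Nat.cast_one] at hs
      rw [hs]
      apply Finset.sum_congr rfl
      intro k hk
      rw [Finset.mem_Ico] at hk
      simp only [PySem.List.pyGetD_natCast]
      rw [PySem.List.getD_map_range (pS nums) nums.length j 0 hj,
        PySem.List.getD_map_range (sS nums) nums.length k 0 (by omega)]
    simp only [Function.comp_apply]
    trans (∑ j ∈ Finset.range nums.length, ∑ k ∈ Finset.Ico (j + 1) nums.length,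
      (if nums.getD j 0 < nums.getD k 0 then pS nums j * sS nums k else 0))
    · exact Finset.sum_congr rfl hstep
    rw [sum_triangle]
    unfold tS
    rw [sum_list_range]
    apply Finset.sum_congr rfl
    intro k hk
    rw [Finset.mem_range] at hk
    unfold Wsum
    rw [sum_list_range, Finset.mul_sum]
    apply Finset.sum_congr rfl
    intro j hj
    split_ifs <;> ring
  · intro t j hjmem
    rw [PySem.List.foldl_congr_mem _ _
      (fun t k => t + (if PySem.List.pyGetD nums j 0 < PySem.List.pyGetD nums k 0
                  then PySem.List.pyGetD ((List.range nums.length).map (pS nums)) j 0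
                     * PySem.List.pyGetD ((List.range nums.length).map (sS nums)) k 0
                  else 0))
      _ (by intro acc k _
            by_cases h : PySem.List.pyGetD nums j 0 < PySem.List.pyGetD nums k 0 <;> simp [h])]
    rw [PySem.List.foldl_add]

lemma answer_char (nums : List Int) :
    answer nums = ((List.range nums.length).map (pS nums),
                   (List.range nums.length).map (sS nums), tS nums) := by
  simp only [answer]
  rw [prefA_eq, suffA_eq, totalA_eq]

lemma suffB_pass (nums : List Int) :
    ∀ m, m ≤ nums.length →
      (((List.range m).map (fun t : Nat => ((nums.length : Int) - 1 - (t : Int)))).foldl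
        (fun (st : List Int × List Int) k =>
          (PySem.List.pySetD st.1 k (split st.2 (PySem.List.pyGetD nums k 0) true),
           PySem.List.insert st.2 (split st.2 (PySem.List.pyGetD nums k 0) false)
             (PySem.List.pyGetD nums k 0)))
        (List.replicate nums.length 0, [])).2.Perm (nums.drop (nums.length - m)) ∧
      List.Pairwise (· ≤ ·)
        (((List.range m).map (fun t : Nat => ((nums.length : Int) - 1 - (t : Int)))).foldl
          (fun (st : List Int × List Int) k =>
            (PySem.List.pySetD st.1 k (split st.2 (PySem.List.pyGetD nums k 0) true),
             PySem.List.insert st.2 (split st.2 (PySem.List.pyGetD nums k 0) false)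
               (PySem.List.pyGetD nums k 0)))
          (List.replicate nums.length 0, [])).2 ∧
      (((List.range m).map (fun t : Nat => ((nums.length : Int) - 1 - (t : Int)))).foldl
        (fun (st : List Int × List Int) k =>
          (PySem.List.pySetD st.1 k (split st.2 (PySem.List.pyGetD nums k 0) true),
           PySem.List.insert st.2 (split st.2 (PySem.List.pyGetD nums k 0) false)
             (PySem.List.pyGetD nums k 0)))
        (List.replicate nums.length 0, [])).1
      = (List.range nums.length).map
          (fun k => if nums.length - m ≤ k then sS nums k else 0) := by
  intro m
  induction m with
  | zero =>
    intro _
    refine ⟨by simp, by simp, ?_⟩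
    simp only [List.range_zero, List.map_nil, List.foldl_nil]
    symm
    rw [show List.replicate nums.length (0 : Int)
        = (List.range nums.length).map (fun _ => (0 : Int)) by
      rw [List.map_const']; simp]
    apply List.map_congr_left
    intro k hk
    rw [List.mem_range] at hk
    rw [if_neg (by omega)]
  | succ m ih =>
    intro hm
    obtain ⟨hperm, hsort, hpre⟩ := ih (by omega)
    rw [List.range_succ, List.map_append, List.foldl_append]
    set stm := ((List.range m).map (fun t : Nat => ((nums.length : Int) - 1 - (t : Int)))).foldl
      (fun (st : List Int × List Int) k =>
        (PySem.List.pySetD st.1 k (split st.2 (PySem.List.pyGetD nums k 0) true),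
         PySem.List.insert st.2 (split st.2 (PySem.List.pyGetD nums k 0) false)
           (PySem.List.pyGetD nums k 0)))
      (List.replicate nums.length 0, []) with hstm
    simp only [List.map_cons, List.map_nil, List.foldl_cons, List.foldl_nil]
    have hk : ((nums.length : Int) - 1 - (m : Int)) = ((nums.length - 1 - m : Nat) : Int) := by
      omega
    set k := nums.length - 1 - m with hkdef
    have hklt : k < nums.length := by omega
    have hx' : PySem.List.pyGetD nums ((k : Nat) : Int) 0 = nums[k] := by
      rw [PySem.List.pyGetD_natCast, PySem.List.getD_eq_getElem_of_lt nums k 0 hklt]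
    have hx : PySem.List.pyGetD nums ((nums.length : Int) - 1 - (m : Int)) 0 = nums[k] := by
      rw [hk, hx']
    have hdropm : nums.length - m = k + 1 := by omega
    have hdrop : nums.drop (nums.length - m) = nums.drop (k + 1) := by rw [hdropm]
    have hsplitT : split stm.2 nums[k] true = sS nums k := by
      rw [split_eq stm.2 nums[k] true hsort]
      have : stm.2.countP (pb nums[k] true) = (nums.drop (k+1)).countP (ltb nums[k]) := by
        rw [show pb nums[k] true = ltb nums[k] from rfl, ← hdrop, hperm.countP_eq]
      rw [this]
      unfold sS
      rw [PySem.List.getD_eq_getElem_of_lt nums k 0 hklt]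
    have hcle : stm.2.countP (leb nums[k]) ≤ stm.2.length := List.countP_le_length
    have hsplitF : split stm.2 nums[k] false
        = ((stm.2.countP (leb nums[k]) : Nat) : Int) := by
      rw [split_eq stm.2 nums[k] false hsort]; rfl
    refine ⟨?_, ?_, ?_⟩
    · -- perm of new seen
      simp only [hx, hsplitF]
      rw [PySem.List.insert_natCast _ _ _ hcle]
      refine List.perm_middle.trans ?_
      rw [List.take_append_drop]
      have heq : nums.drop (nums.length - (m+1)) = nums[k] :: nums.drop (nums.length - m) := by
        rw [hdrop, ← List.drop_eq_getElem_cons hklt]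
        congr 1
        omega
      rw [heq]
      exact hperm.cons nums[k]
    · -- sortedness of new seen
      simp only [hx, hsplitF]
      rw [PySem.List.insert_natCast _ _ _ hcle]
      exact sorted_insert_at_countP stm.2 nums[k] hsort
    · -- the suff array
      simp only [hk, hx', hsplitT, hpre]
      rw [PySem.List.pySetD_natCast,
        set_map_range nums.length _ k (sS nums k) hklt]
      apply List.map_congr_left
      intro i hi
      rw [List.mem_range] at hi
      by_cases hik : i = k
      · subst hik
        rw [if_pos rfl, if_pos (by omega)]
      · rw [if_neg hik]
        split_ifs <;> first | rfl | omega

lemma pb_true_eq (x : Int) : pb x true = ltb x := rfl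
lemma pb_false_eq (x : Int) : pb x false = leb x := rfl

lemma filter_pairs_eq_take (pr : List (Int × Int)) (p : Int → Bool)
    (hmono : ∀ u v : Int, u ≤ v → p v = true → p u = true)
    (hs : List.Pairwise (· ≤ ·) (pr.map Prod.fst)) :
    pr.filter (fun q => p q.1) = pr.take ((pr.map Prod.fst).countP p) := by
  set c := (pr.map Prod.fst).countP p with hc
  have h1 : (pr.take c).filter (fun q => p q.1) = pr.take c := by
    rw [List.filter_eq_self]
    intro q hq
    have hmem : q.1 ∈ List.map Prod.fst (pr.take c) := List.mem_map_of_mem hq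
    rw [List.map_take] at hmem
    exact mem_take_countP (pr.map Prod.fst) p hs hmono q.1 hmem
  have h2 : (pr.drop c).filter (fun q => p q.1) = [] := by
    rw [List.filter_eq_nil_iff]
    intro q hq
    have hmem : q.1 ∈ List.map Prod.fst (pr.drop c) := List.mem_map_of_mem hq
    rw [List.map_drop] at hmem
    simp [mem_drop_countP (pr.map Prod.fst) p hs hmono q.1 hmem]
  conv_lhs => rw [← List.take_append_drop c pr]
  rw [List.filter_append, h1, h2, List.append_nil]

lemma fwdB_pass (nums : List Int) :
    ∀ m, m ≤ nums.length →
      ∃ pr : List (Int × Int),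
        (((List.range m).map (fun i : Nat => (i : Int))).foldl
          (fun (st : List Int × List Int × List Int × Int) k =>
            (PySem.List.pySetD st.1 k ((st.2.1.length : Int) - split st.2.1 (PySem.List.pyGetD nums k 0) false),
             PySem.List.insert st.2.1 (split st.2.1 (PySem.List.pyGetD nums k 0) false) (PySem.List.pyGetD nums k 0),
             PySem.List.insert st.2.2.1 (split st.2.1 (PySem.List.pyGetD nums k 0) false)
               ((st.2.1.length : Int) - split st.2.1 (PySem.List.pyGetD nums k 0) false),
             st.2.2.2 + PySem.List.pyGetD ((List.range nums.length).map (sS nums)) k 0 *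
               (PySem.List.slice st.2.2.1 none (some (split st.2.1 (PySem.List.pyGetD nums k 0) true))).sum))
          (List.replicate nums.length 0, [], [], 0))
        = ((List.range nums.length).map (fun j => if j < m then pS nums j else 0),
           pr.map Prod.fst,
           pr.map Prod.snd,
           ((List.range m).map (fun k => sS nums k * Wsum nums k (nums.getD k 0))).sum) ∧
        pr.Perm ((nums.take m).zip ((List.range m).map (pS nums))) ∧
        List.Pairwise (· ≤ ·) (pr.map Prod.fst) := by
  intro m
  induction m with
  | zero =>
    intro _
    refine ⟨[], ?_, by simp, by simp⟩
    simp only [List.range_zero, List.map_nil, List.foldl_nil, List.sum_nil]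
    refine Prod.ext ?_ rfl
    simp only
    symm
    rw [show List.replicate nums.length (0 : Int)
        = (List.range nums.length).map (fun _ => (0 : Int)) by
      rw [List.map_const']; simp]
    apply List.map_congr_left
    intro j hj
    simp
  | succ m ih =>
    intro hm
    obtain ⟨pr, hfold, hperm, hsort⟩ := ih (by omega)
    rw [List.range_succ, List.map_append, List.foldl_append, hfold]
    simp only [List.map_cons, List.map_nil, List.foldl_cons, List.foldl_nil]
    have hmlt : m < nums.length := by omega
    have hX : PySem.List.pyGetD nums ((m : Nat) : Int) 0 = nums[m] := by
      rw [PySem.List.pyGetD_natCast, PySem.List.getD_eq_getElem_of_lt nums m 0 hmlt]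
    set X := nums[m] with hXdef
    -- lengths
    have hziplen : ((nums.take m).zip ((List.range m).map (pS nums))).length = m := by
      simp [List.length_zip, List.length_take]; omega
    have hprlen : pr.length = m := by rw [hperm.length_eq, hziplen]
    have hvlen : (pr.map Prod.fst).length = m := by simp [hprlen]
    -- the seen values are a permutation of the prefix
    have hvperm : (pr.map Prod.fst).Perm (nums.take m) := by
      have := hperm.map Prod.fst
      rwa [List.map_fst_zip (by simp [List.length_take])] at this
    -- split values
    set cle := (pr.map Prod.fst).countP (leb X) with hcle
    set clt := (pr.map Prod.fst).countP (ltb X) with hclt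
    have hsplitF : split (pr.map Prod.fst) X false = (cle : Int) := by
      rw [split_eq _ _ _ hsort, pb_false_eq, hcle]
    have hsplitT : split (pr.map Prod.fst) X true = (clt : Int) := by
      rw [split_eq _ _ _ hsort, pb_true_eq, hclt]
    have hclelen : cle ≤ pr.length := by
      have h := List.countP_le_length (p := leb X) (l := pr.map Prod.fst)
      rw [List.length_map] at h
      exact h
    have hcltlen : clt ≤ pr.length := by
      have h := List.countP_le_length (p := ltb X) (l := pr.map Prod.fst)
      rw [List.length_map] at h
      exact h
    -- the new prefix count is pS nums m
    have hp : ((pr.map Prod.fst).length : Int) - (cle : Int) = pS nums m := by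
      have hc' : cle = (nums.take m).countP (leb X) := by rw [hcle, hvperm.countP_eq]
      have hsplit' := List.length_eq_countP_add_countP (leb X) (l := nums.take m)
      have hcongr : (nums.take m).countP (fun a => decide ¬(leb X a = true))
          = (nums.take m).countP (gtb (nums.getD m 0)) := by
        apply List.countP_congr
        intro v _
        rw [PySem.List.getD_eq_getElem_of_lt nums m 0 hmlt]
        simp [leb, gtb]
        omega
      have hlentake : (nums.take m).length = m := by simp [List.length_take]; omega
      unfold pS
      rw [← hcongr]
      rw [hvlen, hc']
      omega
    -- ws slice sums to Wsum
    have hws_sum : (List.take clt (pr.map Prod.snd)).sum = Wsum nums m X := by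
      rw [← List.map_take]
      have hfilter : pr.take clt = pr.filter (fun q => ltb X q.1) := by
        rw [filter_pairs_eq_take pr (ltb X) (by intro u v h hv; simp [ltb] at *; omega) hsort,
          ← hclt]
      rw [hfilter]
      have hpermf := (hperm.filter (fun q => ltb X q.1)).map Prod.snd
      rw [hpermf.sum_eq]
      exact zip_filter_sum nums X m (by omega)
    have hsort' : List.Pairwise (· ≤ ·)
        ((pr.take cle ++ (X, pS nums m) :: pr.drop cle).map Prod.fst) := by
      rw [List.map_append, List.map_take, List.map_cons, List.map_drop]
      exact sorted_insert_at_countP (pr.map Prod.fst) X hsort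
    refine ⟨pr.take cle ++ (X, pS nums m) :: pr.drop cle, ?_, ?_, hsort'⟩
    · -- the folded state
      simp only [hX, hsplitF, hsplitT, hp]
      simp only [Prod.mk.injEq]
      refine ⟨?_, ?_, ?_, ?_⟩
      · -- pref array
        rw [PySem.List.pySetD_natCast, set_map_range nums.length _ m (pS nums m) hmlt]
        apply List.map_congr_left
        intro i hi
        rw [List.mem_range] at hi
        by_cases him : i = m
        · subst him; rw [if_pos rfl, if_pos (by omega)]
        · rw [if_neg him]; split_ifs <;> first | rfl | omega
      · -- vals
        rw [PySem.List.insert_natCast _ _ _ (by simp [hprlen]; omega),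
          List.map_append, List.map_take, List.map_cons, List.map_drop]
      · -- ws
        rw [PySem.List.insert_natCast _ _ _ (by simp [hprlen]; omega),
          List.map_append, List.map_take, List.map_cons, List.map_drop]
      · -- total
        rw [PySem.List.slice_to _ (by positivity), Int.toNat_natCast, hws_sum,
          PySem.List.pyGetD_natCast, PySem.List.getD_map_range (sS nums) nums.length m 0 hmlt,
          List.map_append, List.sum_append]
        simp
        left
        simp [List.getElem?_eq_getElem hmlt]
        rw [hXdef]
    · -- the permutation
      refine List.perm_middle.trans ?_
      rw [List.take_append_drop]
      refine (hperm.cons (X, pS nums m)).trans ?_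
      have hzips : (nums.take (m+1)).zip (((List.range m) ++ [m]).map (pS nums))
          = ((nums.take m).zip ((List.range m).map (pS nums))) ++ [(X, pS nums m)] := by
        rw [List.take_add_one, List.map_append]
        simp only [List.getElem?_eq_getElem hmlt, Option.toList_some]
        rw [List.zip_append (by simp [List.length_take]; omega)]
        rfl
      rw [hzips]
      exact (List.perm_append_singleton _ _).symm

lemma answer_alt_char (nums : List Int) :
    answer_alt nums = ((List.range nums.length).map (pS nums),
                       (List.range nums.length).map (sS nums), tS nums) := by
  simp only [answer_alt]
  have hrw : PySem.List.pyRange ((nums.length : Int) - 1) (-1) (-1)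
      = (List.range nums.length).map (fun t : Nat => ((nums.length : Int) - 1 - (t : Int))) := by
    rw [PySem.List.pyRange_neg_one]
    have h0 : ((nums.length : Int) - 1 - (-1)).toNat = nums.length := by omega
    rw [h0]
  rw [hrw]
  have h1 := (suffB_pass nums nums.length le_rfl).2.2
  have h1' : (List.range nums.length).map
      (fun k => if nums.length - nums.length ≤ k then sS nums k else 0)
      = (List.range nums.length).map (sS nums) := by
    apply List.map_congr_left
    intro k _
    rw [if_pos (by omega)]
  rw [h1] at *
  rw [h1']
  rw [PySem.List.pyRange_zero_natCast]
  obtain ⟨pr, hfold, -, -⟩ := fwdB_pass nums nums.length le_rfl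
  rw [hfold]
  have hpref' : (List.range nums.length).map (fun j => if j < nums.length then pS nums j else 0)
      = (List.range nums.length).map (pS nums) := by
    apply List.map_congr_left
    intro j hj
    rw [List.mem_range] at hj
    rw [if_pos hj]
  rw [hpref']
  rfl

-- ===== VERDICT (by name: the statement is the Claim_ definition above) =====
theorem answer_spec : Claim_equal_answer := by
  intro nums _
  unfold Spec_answer
  rw [answer_char, answer_alt_char]
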